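-- pv_equiv track=rewrite | github.com/Sumedha494/DSA-Questions | maximum_product_count.py | countAllProducts
-- ===== SOURCE A (Python) =====
-- def countAllProducts(arr):
--     """
--     Count frequency of each product
--     """
--     if not arr:
--         return {}
--
--     n = len(arr)
--     product_count = {}
--
--     for i in range(n):
--         product = 1
--         for j in range(i, n):
--             product *= arr[j]
--             product_count[product] = product_count.get(product, 0) + 1
--
--     return product_count
-- ===== SOURCE B (Python) =====
-- def countAllProducts(arr):
--     if not arr:
--         return {}
--     # Right-to-left DP: the row of products of subarrays starting at i is
--     # arr[i] followed by arr[i] times each product in the row for i+1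
--     # (no running products are recomputed); then one separate counting pass
--     # over the rows in start order.
--     rows = []
--     nxt = []
--     for x in reversed(arr):
--         nxt = [x] + [x * p for p in nxt]
--         rows.append(nxt)
--     counts = {}
--     for row in reversed(rows):
--         for p in row:
--             counts[p] = counts.get(p, 0) + 1
--     return counts
-- ===== Notes on version B (the rewrite author's own statement) =====
-- stated objective: alternative
-- what changed: Replaces A's nested index loops with running products and interleaved dict updates by a right-to-left dynamic program that derives each start-index row by scaling the following suffix's whole row ([x]+[x*p ...]), stores all rows, and then counts in one separate pass.
import Mathlib
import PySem

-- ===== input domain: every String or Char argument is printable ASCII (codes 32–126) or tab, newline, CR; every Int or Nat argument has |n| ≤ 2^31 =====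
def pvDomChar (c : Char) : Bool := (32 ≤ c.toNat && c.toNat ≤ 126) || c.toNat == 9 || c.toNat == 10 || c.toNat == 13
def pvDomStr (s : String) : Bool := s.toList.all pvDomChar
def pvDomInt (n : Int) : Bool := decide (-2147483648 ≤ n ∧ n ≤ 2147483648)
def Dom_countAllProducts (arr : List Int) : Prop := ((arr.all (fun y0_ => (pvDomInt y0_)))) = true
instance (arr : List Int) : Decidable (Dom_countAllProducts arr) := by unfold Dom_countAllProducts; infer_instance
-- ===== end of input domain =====

-- B replaces A's nested index loops (running product + interleaved dict updates) by a
-- right-to-left DP that derives each start-index row by scaling the next suffix's row,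
-- then counts all rows in one separate pass; objective: alternative decomposition, same cost.

-- ===== PORT A =====
def countAllProducts (arr : List Int) : List (Int × Int) :=
  if arr = [] then []
  else
    let n : Int := arr.length
    ((PySem.List.pyRange 0 n 1).foldl (fun (d : PySem.Dict Int Int) i =>
        ((PySem.List.pyRange i n 1).foldl
          (fun (s : Int × PySem.Dict Int Int) j =>
            let product := s.1 * PySem.List.pyGetD arr j 0
            (product, s.2.insert product (s.2.getD product 0 + 1)))
          (1, d)).2)
      PySem.Dict.empty).items

-- ===== PORT B =====
def countAllProducts_alt (arr : List Int) : List (Int × Int) :=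
  if arr = [] then []
  else
    -- right-to-left DP over reversed(arr): nxt = [x] + [x*p for p in nxt]; rows.append(nxt)
    let st := arr.reverse.foldl
      (fun (s : List Int × List (List Int)) x =>
        let nxt := x :: s.1.map (fun p => x * p)
        (nxt, s.2 ++ [nxt]))
      (([] : List Int), ([] : List (List Int)))
    -- separate counting pass over reversed(rows)
    (st.2.reverse.foldl
        (fun (d : PySem.Dict Int Int) row =>
          row.foldl (fun (d : PySem.Dict Int Int) p => d.insert p (d.getD p 0 + 1)) d)
        PySem.Dict.empty).items

-- ===== PRECONDITION & SPEC =====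
def Spec_countAllProducts (arr : List Int) (out : List (Int × Int)) : Prop := out = countAllProducts_alt arr
instance (arr : List Int) (out : List (Int × Int)) : Decidable (Spec_countAllProducts arr out) := by unfold Spec_countAllProducts; infer_instance

-- ===== CLAIM (what is proved, stated in full; the proofs are below) =====
def Claim_equal_countAllProducts : Prop := ∀ (arr : List Int), Dom_countAllProducts arr → Spec_countAllProducts arr (countAllProducts arr)

-- ===== LEMMAS AND PROOFS =====

-- the partial products p*x1, p*x1*x2, … of a suffix (A's inner running product)
def pvScan (p : Int) : List Int → List Int
  | [] => []
  | x :: t => (p * x) :: pvScan (p * x) t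

-- B's row for a suffix: x :: map (x*·) (row of tail)
def pvRow : List Int → List Int
  | [] => []
  | x :: t => x :: (pvRow t).map (fun p => x * p)

-- B's rows list, one row per nonempty suffix, in start order
def pvRowsSpec : List Int → List (List Int)
  | [] => []
  | x :: t => pvRow (x :: t) :: pvRowsSpec t

-- the flat stream of all subarray products, grouped by start index
def pvAllProducts : List Int → List Int
  | [] => []
  | x :: rest => pvScan 1 (x :: rest) ++ pvAllProducts rest

theorem pvScan_eq_map_row (l : List Int) : ∀ p : Int, pvScan p l = (pvRow l).map (fun q => p * q) := by
  induction l with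
  | nil => intro p; simp [pvScan, pvRow]
  | cons x t ih =>
      intro p
      simp only [pvScan, pvRow, List.map_cons, List.map_map]
      rw [ih (p * x)]
      simp [mul_assoc]

theorem pvScan_one (l : List Int) : pvScan 1 l = pvRow l := by
  rw [pvScan_eq_map_row]; simp

theorem pvAllProducts_eq_flatten (l : List Int) : pvAllProducts l = (pvRowsSpec l).flatten := by
  induction l with
  | nil => simp [pvAllProducts, pvRowsSpec]
  | cons x t ih => simp [pvAllProducts, pvRowsSpec, pvScan_one, ih]

-- B's DP loop computes (row of l, rows of l in reverse)
theorem pvDP (l : List Int) :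
    l.reverse.foldl
      (fun (s : List Int × List (List Int)) x =>
        let nxt := x :: s.1.map (fun p => x * p)
        (nxt, s.2 ++ [nxt]))
      (([] : List Int), ([] : List (List Int)))
    = (pvRow l, (pvRowsSpec l).reverse) := by
  induction l with
  | nil => simp [pvRow, pvRowsSpec]
  | cons x t ih =>
      simp only [List.reverse_cons, List.foldl_append, ih, List.foldl_cons, List.foldl_nil]
      simp [pvRow, pvRowsSpec]

-- counting row by row is counting the flat stream
theorem pvCountRows (rows : List (List Int)) : ∀ d : PySem.Dict Int Int,
    rows.foldl
      (fun (d : PySem.Dict Int Int) row =>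
        row.foldl (fun (d : PySem.Dict Int Int) p => d.insert p (d.getD p 0 + 1)) d) d
    = rows.flatten.foldl (fun (d : PySem.Dict Int Int) p => d.insert p (d.getD p 0 + 1)) d := by
  induction rows with
  | nil => intro d; simp
  | cons r rs ih => intro d; simp [List.foldl_append, ih]

-- A's inner loop over a suffix equals one counting pass over the scan of that suffix
theorem pvInner (l : List Int) : ∀ (p : Int) (d : PySem.Dict Int Int),
    (l.foldl
        (fun (s : Int × PySem.Dict Int Int) x =>
          (s.1 * x, s.2.insert (s.1 * x) (s.2.getD (s.1 * x) 0 + 1)))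
        (p, d)).2
      = (pvScan p l).foldl (fun d q => d.insert q (d.getD q 0 + 1)) d := by
  induction l with
  | nil => intro p d; simp [pvScan]
  | cons x t ih =>
      intro p d
      simp only [List.foldl_cons, pvScan]
      rw [ih]

-- A's outer loop from index k equals one counting pass over all products of the k-th suffix
theorem pvOuter (arr : List Int) : ∀ (k : Nat) (d : PySem.Dict Int Int),
    (PySem.List.pyRange (k : Int) (arr.length : Int) 1).foldl
        (fun (d : PySem.Dict Int Int) i =>
          ((PySem.List.pyRange i (arr.length : Int) 1).foldl
            (fun (s : Int × PySem.Dict Int Int) j =>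
              let product := s.1 * PySem.List.pyGetD arr j 0
              (product, s.2.insert product (s.2.getD product 0 + 1)))
            (1, d)).2)
        d
      = (pvAllProducts (arr.drop k)).foldl (fun d q => d.insert q (d.getD q 0 + 1)) d := by
  intro k d
  induction h : arr.length - k generalizing k d with
  | zero =>
      have hk : arr.length ≤ k := by omega
      rw [PySem.List.pyRange_one_eq_nil (by exact_mod_cast hk)]
      rw [List.drop_eq_nil_of_le hk]
      simp [pvAllProducts]
  | succ m ih =>
      have hk : k < arr.length := by omega
      rw [PySem.List.pyRange_one_cons (by exact_mod_cast hk)]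
      simp only [List.foldl_cons]
      have hdrop : arr.drop k = arr[k] :: arr.drop (k + 1) := by
        rw [List.drop_eq_getElem_cons hk]
      have hhead :
          ((PySem.List.pyRange (k : Int) (arr.length : Int) 1).foldl
            (fun (s : Int × PySem.Dict Int Int) j =>
              let product := s.1 * PySem.List.pyGetD arr j 0
              (product, s.2.insert product (s.2.getD product 0 + 1)))
            (1, d)).2
          = (pvScan 1 (arr.drop k)).foldl (fun d q => d.insert q (d.getD q 0 + 1)) d := by
        rw [PySem.List.foldl_pyRange_pyGetD' (a := (k : Int)) arr 0
              (fun (s : Int × PySem.Dict Int Int) x =>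
                (s.1 * x, s.2.insert (s.1 * x) (s.2.getD (s.1 * x) 0 + 1)))
              (1, d) (by positivity)]
        simp only [Int.toNat_natCast]
        exact pvInner (arr.drop k) 1 d
      rw [hhead]
      have hcast : (k : Int) + 1 = ((k + 1 : Nat) : Int) := by push_cast; ring
      rw [hcast, ih (k + 1) _ (by omega)]
      rw [hdrop]
      show _ = (pvAllProducts (arr[k] :: arr.drop (k + 1))).foldl _ _
      rw [pvAllProducts, List.foldl_append, ← hdrop]

-- ===== VERDICT (by name: the statement is the Claim_ definition above) =====
theorem countAllProducts_spec : Claim_equal_countAllProducts := by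
  intro arr _
  unfold Spec_countAllProducts countAllProducts countAllProducts_alt
  by_cases h : arr = []
  · simp [h]
  · simp only [if_neg h, pvDP, List.reverse_reverse]
    have := pvOuter arr 0 PySem.Dict.empty
    simp only [Nat.cast_zero, List.drop_zero] at this
    rw [pvCountRows, ← pvAllProducts_eq_flatten, this]
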